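-- pv_equiv track=rewrite | github.com/iamvickynguyen/Kattis-Solutions | chess.py | one_move
-- ===== SOURCE A (Python) =====
-- def one_move(x, y):
--     moves = set()
--     for i in range(1, 9):
--         for j in range(1, 9):
--             if abs(i-x) == abs(j-y):
--                 point = (i, j)
--                 moves.add(point)
--     return moves
-- ===== SOURCE B (Python) =====
-- def one_move(x, y):
--     def row(i):
--         d = abs(i - x)
--         cols = [y - d] if d == 0 else [y - d, y + d]
--         return [(i, j) for j in cols if 1 <= j <= 8]
--     return set(p for i in range(1, 9) for p in row(i))
-- ===== Notes on version B (the rewrite author's own statement) =====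
-- stated objective: simpler
-- what changed: B replaces A's 64-square scan with incremental set.add by a per-row helper that computes the one or two diagonal columns arithmetically, concatenates the eight tiny row lists, and dedups once with set() at the end.
import Mathlib
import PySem

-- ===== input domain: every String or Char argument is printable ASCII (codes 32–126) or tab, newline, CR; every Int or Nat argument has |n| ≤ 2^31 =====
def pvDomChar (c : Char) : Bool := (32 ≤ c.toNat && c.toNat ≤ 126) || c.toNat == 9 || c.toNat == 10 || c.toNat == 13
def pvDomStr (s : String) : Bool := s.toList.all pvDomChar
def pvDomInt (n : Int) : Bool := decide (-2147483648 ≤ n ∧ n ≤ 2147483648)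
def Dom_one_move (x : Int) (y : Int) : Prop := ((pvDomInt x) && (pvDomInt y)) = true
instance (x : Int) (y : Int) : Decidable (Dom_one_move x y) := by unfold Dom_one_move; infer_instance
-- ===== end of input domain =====

-- B replaces A's 64-square scan-with-set.add by a per-row helper computing the diagonal
-- columns arithmetically, flat-mapped over the rows and deduped once (simpler decomposition).

-- ===== PORT A =====
def one_move (x : Int) (y : Int) : List (Int × Int) :=
  (PySem.List.pyRange 1 9 1).foldl (fun moves i =>
    (PySem.List.pyRange 1 9 1).foldl (fun moves j =>
      if |i - x| = |j - y| then PySem.Set.add moves (i, j) else moves) moves)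
    PySem.Set.empty

-- ===== PORT B =====
def pvRow (x : Int) (y : Int) (i : Int) : List (Int × Int) :=
  let d := |i - x|
  let cols : List Int := if d = 0 then [y - d] else [y - d, y + d]
  (cols.filter (fun j => decide (1 ≤ j ∧ j ≤ 8))).map (fun j => (i, j))

def one_move_alt (x : Int) (y : Int) : List (Int × Int) :=
  PySem.Set.ofList ((PySem.List.pyRange 1 9 1).flatMap (pvRow x y))

-- ===== PRECONDITION & SPEC =====
def Spec_one_move (x : Int) (y : Int) (out : List (Int × Int)) : Prop := out = one_move_alt x y
instance (x : Int) (y : Int) (out : List (Int × Int)) : Decidable (Spec_one_move x y out) := by unfold Spec_one_move; infer_instance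

-- ===== CLAIM (what is proved, stated in full; the proofs are below) =====
def Claim_equal_one_move : Prop := ∀ (x : Int) (y : Int), Dom_one_move x y → Spec_one_move x y (one_move x y)

-- ===== LEMMAS AND PROOFS =====

-- a fold of folds over the pieces is a fold over the flattened list
theorem pv_foldl_flatMap {α β : Type} (g : Int → List α) (f : β → α → β) :
    ∀ (l : List Int) (init : β),
      l.foldl (fun acc i => (g i).foldl f acc) init = (l.flatMap g).foldl f init := by
  intro l
  induction l with
  | nil => intro init; rfl
  | cons a t ih => intro init; simp [List.flatMap_cons, List.foldl_append, ih]

-- the j-loop of A, for a fixed row i, collects exactly pvRow x y i (in the same order)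
theorem pv_row_eq (x y i : Int) :
    ((PySem.List.pyRange 1 9 1).filter (fun j => decide (|i - x| = |j - y|))).map
        (fun j => (i, j)) = pvRow x y i := by
  have hr : PySem.List.pyRange 1 9 1 = [1, 2, 3, 4, 5, 6, 7, 8] := by decide
  have hd : 0 ≤ |i - x| := abs_nonneg _
  have hcond : ∀ j : Int, (|i - x| = |j - y|) ↔ (j = y - |i - x| ∨ j = y + |i - x|) := by
    intro j; rw [eq_comm, abs_eq hd]; omega
  rw [hr]
  unfold pvRow
  simp only [hcond]
  set d := |i - x| with hdd
  clear_value d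
  by_cases h0 : d = 0
  · subst h0
    by_cases hy1 : 1 ≤ y
    · by_cases hy8 : y ≤ 8
      · interval_cases y <;> simp
      · have hne : ∀ j : Int, j ≤ 8 → ¬(j = y) := by omega
        simp [hne, hy8]
    · have hne : ∀ j : Int, 1 ≤ j → ¬(j = y) := by omega
      simp [hne, hy1]
  · have hdpos : 0 < d := lt_of_le_of_ne hd (Ne.symm h0)
    simp only [if_neg h0]
    set a := y - d with ha
    set b := y + d with hb
    have hab : a < b := by omega
    by_cases ha1 : 1 ≤ a
    · by_cases ha8 : a ≤ 8
      · by_cases hb8 : b ≤ 8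
        · have hb1 : 1 ≤ b := by omega
          interval_cases a <;> interval_cases b <;> simp
        · have hbne : ∀ j : Int, j ≤ 8 → ¬(j = b) := by omega
          have hb' : ¬(1 ≤ b ∧ b ≤ 8) := by omega
          interval_cases a <;> simp [hbne, hb']
      · have hane : ∀ j : Int, j ≤ 8 → ¬(j = a) := by omega
        have hbne : ∀ j : Int, j ≤ 8 → ¬(j = b) := by omega
        have ha' : ¬(1 ≤ a ∧ a ≤ 8) := by omega
        have hb' : ¬(1 ≤ b ∧ b ≤ 8) := by omega
        simp [hane, hbne, ha', hb']
    · have hane : ∀ j : Int, 1 ≤ j → ¬(j = a) := by omega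
      have ha' : ¬(1 ≤ a ∧ a ≤ 8) := by omega
      by_cases hb1 : 1 ≤ b
      · by_cases hb8 : b ≤ 8
        · interval_cases b <;> simp [hane, ha']
        · have hbne : ∀ j : Int, j ≤ 8 → ¬(j = b) := by omega
          have hb' : ¬(1 ≤ b ∧ b ≤ 8) := by omega
          simp [hane, hbne, ha', hb']
      · have hbne : ∀ j : Int, 1 ≤ j → ¬(j = b) := by omega
        have hb' : ¬(1 ≤ b ∧ b ≤ 8) := by omega
        simp [hane, hbne, ha', hb']

theorem pv_eq (x y : Int) : one_move x y = one_move_alt x y := by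
  unfold one_move one_move_alt
  rw [PySem.Set.ofList_eq_foldl]
  rw [← pv_foldl_flatMap (fun i => pvRow x y i) PySem.Set.add]
  apply PySem.List.foldl_congr_mem
  intro acc i _
  rw [← pv_row_eq x y i]
  rw [List.foldl_map]
  rw [PySem.List.foldl_ite_eq_foldl_filter]

-- ===== VERDICT (by name: the statement is the Claim_ definition above) =====
theorem one_move_spec : Claim_equal_one_move := by
  intro x y _
  unfold Spec_one_move
  exact pv_eq x y
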